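-- pv_equiv track=rewrite | github.com/rosscon/rosscon_advent_of_code | 2019/day_22/02.py | polypow
-- ===== SOURCE A (Python) =====
-- def polypow(in_a, in_b, in_m, in_n):
--     if in_m == 0:
--         return 1, 0
--     if in_m % 2 == 0:
--         return polypow(in_a * in_a % in_n, (in_a * in_b + in_b) % in_n, in_m // 2, in_n)
--     else:
--         c, d = polypow(in_a, in_b, in_m - 1, in_n)
--         return in_a * c % in_n, (in_a * d + in_b) % in_n
-- ===== SOURCE B (Python) =====
-- def polypow(in_a, in_b, in_m, in_n):
--     # Iterative binary exponentiation of the affine map x -> a*x + b under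
--     # composition mod n: square the base while scanning the exponent's bits.
--     res_a, res_b = 1, 0
--     base_a, base_b = in_a, in_b
--     m = in_m
--     while m > 0:
--         if m % 2 == 1:
--             res_a, res_b = base_a * res_a % in_n, (base_a * res_b + base_b) % in_n
--         base_a, base_b = base_a * base_a % in_n, (base_a * base_b + base_b) % in_n
--         m //= 2
--     return res_a, res_b
-- ===== Notes on version B (the rewrite author's own statement) =====
-- stated objective: alternative
-- what changed: Replaces A's top-down recursion (peel one step when odd, square when even) with an iterative bottom-up binary-exponentiation loop over the bits of in_m that maintains a result pair and a squared base pair; Pre_ excludes negative in_m (A recurses forever, RecursionError) and in_n = 0 with in_m > 0 (ZeroDivisionError).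
import Mathlib
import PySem

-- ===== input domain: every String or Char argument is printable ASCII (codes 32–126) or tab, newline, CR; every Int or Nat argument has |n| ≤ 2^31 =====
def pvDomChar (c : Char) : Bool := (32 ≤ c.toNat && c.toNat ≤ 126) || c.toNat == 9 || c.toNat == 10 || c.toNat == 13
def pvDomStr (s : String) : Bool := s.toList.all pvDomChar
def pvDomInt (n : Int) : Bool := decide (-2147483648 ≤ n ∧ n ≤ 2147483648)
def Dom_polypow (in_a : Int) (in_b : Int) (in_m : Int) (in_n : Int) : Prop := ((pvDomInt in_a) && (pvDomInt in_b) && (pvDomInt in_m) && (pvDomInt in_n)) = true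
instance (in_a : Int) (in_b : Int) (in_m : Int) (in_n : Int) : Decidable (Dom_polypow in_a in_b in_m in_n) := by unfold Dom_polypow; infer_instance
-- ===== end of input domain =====

-- B replaces A's top-down recursion with an iterative bottom-up binary-exponentiation
-- loop over the exponent's bits (alternative decomposition, same asymptotic cost).

-- ===== PORT A =====
-- literal transliteration of A; on in_m < 0 Python recurses forever (RecursionError),
-- the port returns (1, 0) there to be total (such inputs are outside Pre_polypow)
def polypow (in_a : Int) (in_b : Int) (in_m : Int) (in_n : Int) : Int × Int :=
  if in_m = 0 then (1, 0)
  else if in_m < 0 then (1, 0)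
  else if PySem.Int.mod in_m 2 = 0 then
    polypow (PySem.Int.mod (in_a * in_a) in_n) (PySem.Int.mod (in_a * in_b + in_b) in_n)
      (PySem.Int.floordiv in_m 2) in_n
  else
    let cd := polypow in_a in_b (in_m - 1) in_n
    (PySem.Int.mod (in_a * cd.1) in_n, PySem.Int.mod (in_a * cd.2 + in_b) in_n)
termination_by in_m.toNat
decreasing_by
  · have h2 : PySem.Int.floordiv in_m 2 = in_m / 2 := PySem.Int.floordiv_eq_ediv_of_pos (by omega)
    omega
  · omega

-- ===== PORT B =====
def polypowAltLoop (in_n ra rb ba bb m : Int) : Int × Int :=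
  if 0 < m then
    let p := if PySem.Int.mod m 2 = 1
             then (PySem.Int.mod (ba * ra) in_n, PySem.Int.mod (ba * rb + bb) in_n)
             else (ra, rb)
    polypowAltLoop in_n p.1 p.2 (PySem.Int.mod (ba * ba) in_n)
      (PySem.Int.mod (ba * bb + bb) in_n) (PySem.Int.floordiv m 2)
  else (ra, rb)
termination_by m.toNat
decreasing_by
  have h2 : PySem.Int.floordiv m 2 = m / 2 := PySem.Int.floordiv_eq_ediv_of_pos (by omega)
  omega

def polypow_alt (in_a : Int) (in_b : Int) (in_m : Int) (in_n : Int) : Int × Int :=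
  polypowAltLoop in_n 1 0 in_a in_b in_m

-- ===== PRECONDITION & SPEC =====
-- Pre_ excludes exactly the inputs on which Python A raises: negative in_m
-- (unbounded recursion, RecursionError) and in_n = 0 with in_m ≠ 0 (ZeroDivisionError).
def Pre_polypow (in_a : Int) (in_b : Int) (in_m : Int) (in_n : Int) : Prop :=
  0 ≤ in_m ∧ (in_m = 0 ∨ in_n ≠ 0)
instance (in_a : Int) (in_b : Int) (in_m : Int) (in_n : Int) : Decidable (Pre_polypow in_a in_b in_m in_n) := by unfold Pre_polypow; infer_instance

def pvWitness_polypow : Int × Int × Int × Int := (3, 4, 10, 7)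

def Spec_polypow (in_a : Int) (in_b : Int) (in_m : Int) (in_n : Int) (out : Int × Int) : Prop := out = polypow_alt in_a in_b in_m in_n
instance (in_a : Int) (in_b : Int) (in_m : Int) (in_n : Int) (out : Int × Int) : Decidable (Spec_polypow in_a in_b in_m in_n out) := by unfold Spec_polypow; infer_instance

-- ===== CLAIM =====
def Claim_equal_polypow : Prop := ∀ (in_a : Int) (in_b : Int) (in_m : Int) (in_n : Int), Dom_polypow in_a in_b in_m in_n → Pre_polypow in_a in_b in_m in_n → Spec_polypow in_a in_b in_m in_n (polypow in_a in_b in_m in_n)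

-- ===== LEMMAS AND PROOFS =====

-- the m-fold composition of x ↦ a·x + b, as an (a, b) pair, with no reduction mod n
def aff (a b : Int) : Nat → Int × Int
  | 0 => (1, 0)
  | k+1 => (a * (aff a b k).1, a * (aff a b k).2 + b)

lemma pymod_modEq (x n : Int) : Int.ModEq n (PySem.Int.mod x n) x := by
  rw [Int.modEq_iff_dvd]
  exact ⟨PySem.Int.floordiv x n, by linear_combination - PySem.Int.floordiv_mul_add_mod x n⟩

lemma pymod_congr {n a b : Int} (hn : n ≠ 0) (h : Int.ModEq n a b) :
    PySem.Int.mod a n = PySem.Int.mod b n := by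
  have ha := PySem.Int.floordiv_mul_add_mod a n
  have hb := PySem.Int.floordiv_mul_add_mod b n
  have hd : n ∣ (PySem.Int.mod a n - PySem.Int.mod b n) := by
    obtain ⟨k, hk⟩ := (Int.modEq_iff_dvd.mp h)
    exact ⟨-k - PySem.Int.floordiv a n + PySem.Int.floordiv b n, by linear_combination -hk + ha - hb⟩
  rcases lt_or_gt_of_ne hn with hneg | hpos
  · have h1 := PySem.Int.mod_neg_bounds a hneg
    have h2 := PySem.Int.mod_neg_bounds b hneg
    have h0 := Int.eq_zero_of_dvd_of_natAbs_lt_natAbs hd (by omega)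
    omega
  · have h1 := PySem.Int.mod_nonneg a hpos
    have h2 := PySem.Int.mod_lt a hpos
    have h3 := PySem.Int.mod_nonneg b hpos
    have h4 := PySem.Int.mod_lt b hpos
    have h0 := Int.eq_zero_of_dvd_of_natAbs_lt_natAbs hd (by omega)
    omega

-- peeling a step at the BOTTOM of the composition instead of the top
lemma aff_succ_bottom (a b : Int) (k : Nat) :
    aff a b (k+1) = ((aff a b k).1 * a, (aff a b k).1 * b + (aff a b k).2) := by
  induction k with
  | zero => show (a*1, a*0+b) = (1*a, 1*b+0)
            simp only [Prod.mk.injEq]; constructor <;> ring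
  | succ k ih =>
    have e1 : (aff a b (k+1)).1 = (aff a b k).1 * a := congrArg Prod.fst ih
    have e2 : (aff a b (k+1)).2 = (aff a b k).1 * b + (aff a b k).2 := congrArg Prod.snd ih
    have e3 : a * (aff a b k).2 + b = (aff a b k).1 * b + (aff a b k).2 := e2
    show (a * (aff a b (k+1)).1, a * (aff a b (k+1)).2 + b) = _
    rw [e1, e2]
    simp only [Prod.mk.injEq]
    exact ⟨by ring, by linear_combination e3⟩

lemma aff_double (a b : Int) (k : Nat) :
    aff (a * a) (a * b + b) k = aff a b (2 * k) := by
  induction k with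
  | zero => rfl
  | succ k ih =>
    have h2 : 2 * (k + 1) = (2 * k + 1) + 1 := by ring
    rw [h2]
    show ((a*a) * (aff (a*a) (a*b+b) k).1, (a*a) * (aff (a*a) (a*b+b) k).2 + (a*b+b)) = _
    rw [ih]
    show _ = (a * (a * (aff a b (2*k)).1), a * (a * (aff a b (2*k)).2 + b) + b)
    simp only [Prod.mk.injEq]; constructor <;> ring

lemma aff_congr {n a a' b b' : Int} (ha : Int.ModEq n a a') (hb : Int.ModEq n b b') (k : Nat) :
    Int.ModEq n (aff a b k).1 (aff a' b' k).1 ∧ Int.ModEq n (aff a b k).2 (aff a' b' k).2 := by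
  induction k with
  | zero => exact ⟨Int.ModEq.refl _, Int.ModEq.refl _⟩
  | succ k ih => exact ⟨ha.mul ih.1, (ha.mul ih.2).add hb⟩

lemma polypow_eq_aff (k : Nat) : ∀ (a b n : Int), 0 < k → n ≠ 0 →
    polypow a b (k : Int) n = (PySem.Int.mod (aff a b k).1 n, PySem.Int.mod (aff a b k).2 n) := by
  induction k using Nat.strong_induction_on with
  | _ k ih =>
    intro a b n hk hn
    rw [polypow]
    have hk0 : ¬ ((k : Int) = 0) := by omega
    have hkneg : ¬ ((k : Int) < 0) := by omega
    have hm2 : PySem.Int.mod (k : Int) 2 = ((k % 2 : Nat) : Int) := PySem.Int.mod_natCast k 2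
    have hfd : PySem.Int.floordiv (k : Int) 2 = ((k / 2 : Nat) : Int) := PySem.Int.floordiv_natCast k 2
    simp only [hk0, hkneg, if_false, dif_neg, not_false_iff, hm2, hfd]
    by_cases hev : k % 2 = 0
    · have hj : 0 < k / 2 := by omega
      simp only [hev, Nat.cast_zero, if_true]
      rw [ih (k / 2) (by omega) _ _ _ hj hn]
      have hcong := aff_congr (n := n) (pymod_modEq (a * a) n) (pymod_modEq (a * b + b) n) (k / 2)
      have hA : aff (a * a) (a * b + b) (k / 2) = aff a b k := by
        rw [aff_double]; congr 1; omega
      rw [hA] at hcong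
      exact Prod.ext (pymod_congr hn hcong.1) (pymod_congr hn hcong.2)
    · have hodd : k % 2 = 1 := by omega
      simp only [hodd, Nat.cast_one, if_neg (by norm_num : (1 : Int) ≠ 0)]
      have hk1 : (k : Int) - 1 = ((k - 1 : Nat) : Int) := by omega
      rw [hk1]
      have hkstep : k = (k - 1) + 1 := by omega
      by_cases h1 : k - 1 = 0
      · have hk' : k = 1 := by omega
        subst hk'
        show (PySem.Int.mod (a * (polypow a b ((0:Nat) : Int) n).1) n,
              PySem.Int.mod (a * (polypow a b ((0:Nat) : Int) n).2 + b) n) = _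
        rw [show polypow a b ((0:Nat) : Int) n = (1, 0) from by rw [polypow]; rfl]
        rfl
      · rw [ih (k - 1) (by omega) _ _ _ (by omega) hn]
        have hc1 := (pymod_modEq (aff a b (k-1)).1 n).mul_left a
        have hc2 := ((pymod_modEq (aff a b (k-1)).2 n).mul_left a).add_right b
        have hgoal1 : aff a b k = (a * (aff a b (k-1)).1, a * (aff a b (k-1)).2 + b) := by
          rw [hkstep]; rfl
        rw [hgoal1]
        exact Prod.ext (pymod_congr hn hc1) (pymod_congr hn hc2)

lemma polypowAltLoop_eq_aff (k : Nat) : ∀ (ra rb ba bb n : Int), 0 < k → n ≠ 0 →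
    polypowAltLoop n ra rb ba bb (k : Int) =
      (PySem.Int.mod ((aff ba bb k).1 * ra) n,
       PySem.Int.mod ((aff ba bb k).1 * rb + (aff ba bb k).2) n) := by
  induction k using Nat.strong_induction_on with
  | _ k ih =>
    intro ra rb ba bb n hk hn
    rw [polypowAltLoop]
    have hkpos : (0 : Int) < (k : Int) := by omega
    have hm2 : PySem.Int.mod (k : Int) 2 = ((k % 2 : Nat) : Int) := PySem.Int.mod_natCast k 2
    have hfd : PySem.Int.floordiv (k : Int) 2 = ((k / 2 : Nat) : Int) := PySem.Int.floordiv_natCast k 2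
    rw [if_pos hkpos]
    have hbase := aff_congr (n := n) (pymod_modEq (ba * ba) n) (pymod_modEq (ba * bb + bb) n) (k / 2)
    have hA : aff (ba * ba) (ba * bb + bb) (k / 2) = aff ba bb (2 * (k / 2)) := aff_double ba bb (k / 2)
    rw [hA] at hbase
    by_cases hev : k % 2 = 0
    · have hj : 0 < k / 2 := by omega
      have h2j : 2 * (k / 2) = k := by omega
      rw [h2j] at hbase
      have hcond : ¬ (PySem.Int.mod (k : Int) 2 = 1) := by rw [hm2, hev]; norm_num
      rw [if_neg hcond, hfd]
      dsimp only
      rw [ih (k / 2) (by omega) _ _ _ _ _ hj hn]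
      exact Prod.ext (pymod_congr hn (hbase.1.mul_right ra))
        (pymod_congr hn ((hbase.1.mul_right rb).add hbase.2))
    · have hodd : k % 2 = 1 := by omega
      have hcond : PySem.Int.mod (k : Int) 2 = 1 := by rw [hm2, hodd]; norm_num
      rw [if_pos hcond, hfd]
      dsimp only
      have hkstep : k = 2 * (k / 2) + 1 := by omega
      by_cases hj0 : k / 2 = 0
      · have hk1 : k = 1 := by omega
        subst hk1
        rw [show polypowAltLoop n (PySem.Int.mod (ba * ra) n) (PySem.Int.mod (ba * rb + bb) n)
              (PySem.Int.mod (ba * ba) n) (PySem.Int.mod (ba * bb + bb) n) (((1/2 : Nat)) : Int)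
              = (PySem.Int.mod (ba * ra) n, PySem.Int.mod (ba * rb + bb) n) from by
          rw [polypowAltLoop]; norm_num]
        have e1 : Int.ModEq n (ba * ra) ((aff ba bb 1).1 * ra) := by
          show Int.ModEq n (ba * ra) ((ba * 1) * ra); rw [mul_one]
        have e2 : Int.ModEq n (ba * rb + bb) ((aff ba bb 1).1 * rb + (aff ba bb 1).2) := by
          show Int.ModEq n (ba * rb + bb) ((ba * 1) * rb + (ba * 0 + bb))
          rw [mul_one, mul_zero, zero_add]
        exact Prod.ext (pymod_congr hn e1) (pymod_congr hn e2)
      · rw [ih (k / 2) (by omega) _ _ _ _ _ (by omega) hn]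
        set j := k / 2 with hjdef
        have hksucc : aff ba bb k = ((aff ba bb (2*j)).1 * ba, (aff ba bb (2*j)).1 * bb + (aff ba bb (2*j)).2) := by
          rw [hkstep, aff_succ_bottom]
        rw [hksucc]
        have m1 := pymod_modEq (ba * ra) n
        have m2 := pymod_modEq (ba * rb + bb) n
        have e1 : Int.ModEq n ((aff (PySem.Int.mod (ba*ba) n) (PySem.Int.mod (ba*bb+bb) n) j).1 * PySem.Int.mod (ba * ra) n)
            (((aff ba bb (2*j)).1 * ba) * ra) := by
          have := hbase.1.mul m1
          calc (aff (PySem.Int.mod (ba*ba) n) (PySem.Int.mod (ba*bb+bb) n) j).1 * PySem.Int.mod (ba * ra) n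
              ≡ (aff ba bb (2*j)).1 * (ba * ra) [ZMOD n] := this
            _ = ((aff ba bb (2*j)).1 * ba) * ra := by ring
        have e2 : Int.ModEq n ((aff (PySem.Int.mod (ba*ba) n) (PySem.Int.mod (ba*bb+bb) n) j).1 * PySem.Int.mod (ba * rb + bb) n + (aff (PySem.Int.mod (ba*ba) n) (PySem.Int.mod (ba*bb+bb) n) j).2)
            (((aff ba bb (2*j)).1 * ba) * rb + ((aff ba bb (2*j)).1 * bb + (aff ba bb (2*j)).2)) := by
          have := (hbase.1.mul m2).add hbase.2
          calc _ ≡ (aff ba bb (2*j)).1 * (ba * rb + bb) + (aff ba bb (2*j)).2 [ZMOD n] := this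
            _ = ((aff ba bb (2*j)).1 * ba) * rb + ((aff ba bb (2*j)).1 * bb + (aff ba bb (2*j)).2) := by ring
        exact Prod.ext (pymod_congr hn e1) (pymod_congr hn e2)

-- ===== VERDICT =====
theorem polypow_spec : Claim_equal_polypow := by
  intro a b m n _ hpre
  unfold Spec_polypow polypow_alt
  obtain ⟨hm, hn⟩ := hpre
  by_cases hm0 : m = 0
  · subst hm0
    rw [polypow, if_pos rfl, polypowAltLoop, if_neg (by omega)]
  · have hn' : n ≠ 0 := by tauto
    have hk : m = ((m.toNat : Nat) : Int) := by omega
    rw [hk, polypow_eq_aff m.toNat a b n (by omega) hn',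
        polypowAltLoop_eq_aff m.toNat 1 0 a b n (by omega) hn']
    exact Prod.ext (pymod_congr hn' (by rw [mul_one])) (pymod_congr hn' (by rw [mul_zero, zero_add]))
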